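-- pv_equiv track=rewrite | github.com/megafyk/scratch2test | lc/dp/longest-square-streak-in-an-array.py | longestSquareStreak
-- ===== SOURCE A (Python) =====
-- from typing import List
--
-- def longestSquareStreak(nums: List[int]) -> int:
--     # dp
--     # time O(nlogn), space O(n)
--     nums = sorted(nums, reverse=True)
--     dp = {}
--     mx = 0
--     for num in nums:
--         if num not in dp:
--             dp[num] = 1
--             nxt = num ** 2
--             if nxt in dp:
--                 dp[num] += dp[nxt]
--             mx = max(mx, dp[num])
--     return mx if mx != 1 else -1
-- ===== SOURCE B (Python) =====
-- def longestSquareStreak(nums):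
--     # Hash-set walk: for each value, follow the squaring chain through the set.
--     # A step is counted whenever the square is present; at a self-square value
--     # (0 or 1) the loop stops after counting it once, as A's dp does.
--     s = set(nums)
--     best = 0
--     for x in s:
--         cur, n = x, 1
--         while cur * cur in s:
--             n += 1
--             if cur * cur == cur:
--                 break
--             cur = cur * cur
--         best = max(best, n)
--     return -1 if best == 1 else best
-- ===== Notes on version B (the rewrite author's own statement) =====
-- stated objective: faster
-- what changed: replaces sorting the array and filling a dict DP in descending order by a hash set plus an independent square-chain walk from each distinct value, removing the sort entirely
import Mathlib
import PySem

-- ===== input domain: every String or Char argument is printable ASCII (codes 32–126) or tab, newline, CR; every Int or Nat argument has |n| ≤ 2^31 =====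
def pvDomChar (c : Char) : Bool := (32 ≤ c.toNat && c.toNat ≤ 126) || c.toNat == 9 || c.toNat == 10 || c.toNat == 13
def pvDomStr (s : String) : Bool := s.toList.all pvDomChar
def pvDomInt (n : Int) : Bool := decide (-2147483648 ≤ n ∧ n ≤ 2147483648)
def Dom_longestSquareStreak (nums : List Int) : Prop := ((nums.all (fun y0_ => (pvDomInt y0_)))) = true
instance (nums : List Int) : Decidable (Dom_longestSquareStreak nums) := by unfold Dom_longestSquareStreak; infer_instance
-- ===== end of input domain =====

-- B replaces A's sort + dict DP by a hash set and a per-element square-chain walk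
-- (no sorting); equal return value on every input.

-- ===== PORT A =====
-- loop body of A's 'for num in nums' (state: the dict dp and the running max mx)
def pvStepA (st : PySem.Dict Int Int × Int) (num : Int) : PySem.Dict Int Int × Int :=
  if st.1.contains num then st
  else
    let dp1 := st.1.insert num 1
    let nxt := num ^ 2
    let dp2 := if dp1.contains nxt then dp1.insert num (dp1.getD num 0 + dp1.getD nxt 0) else dp1
    (dp2, max st.2 (dp2.getD num 0))

def longestSquareStreak (nums : List Int) : Int :=
  let res := (PySem.List.sorted nums (fun x => x) true).foldl pvStepA (PySem.Dict.empty, 0)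
  if res.2 ≠ 1 then res.2 else -1

-- ===== PORT B =====
-- Source B's while loop as fuel recursion; fuel = nums.length is enough: every
-- executed step moves to a strictly larger member of the set s, so fewer than
-- s.length ≤ nums.length iterations ever run.
def pvWalk (s : List Int) : Nat → Int → Int → Int
  | 0, _, n => n
  | f + 1, cur, n =>
    if cur * cur ∈ s then
      (if cur * cur = cur then n + 1 else pvWalk s f (cur * cur) (n + 1))
    else n

def longestSquareStreak_alt (nums : List Int) : Int :=
  let s := PySem.Set.ofList nums
  let best := s.foldl (fun b x => max b (pvWalk s nums.length x 1)) 0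
  if best = 1 then -1 else best

-- ===== PRECONDITION & SPEC =====
def Spec_longestSquareStreak (nums : List Int) (out : Int) : Prop := out = longestSquareStreak_alt nums
instance (nums : List Int) (out : Int) : Decidable (Spec_longestSquareStreak nums out) := by unfold Spec_longestSquareStreak; infer_instance

-- ===== CLAIM (what is proved, stated in full; the proofs are below) =====
def Claim_equal_longestSquareStreak : Prop := ∀ (nums : List Int), Dom_longestSquareStreak nums → Spec_longestSquareStreak nums (longestSquareStreak nums)

-- ===== LEMMAS AND PROOFS =====

lemma pv_lt_sq {v : Int} (h : v * v ≠ v) : v < v * v := by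
  have h1 : 0 ≤ (2 * v - 1) ^ 2 := sq_nonneg _
  have h2 : v ≤ v * v := by nlinarith
  exact lt_of_le_of_ne h2 (Ne.symm h)

-- countP strictly decreases when the predicate weakens and a witness separates them
lemma pv_countP_lt {l : List Int} {p q : Int → Bool} (himp : ∀ u, q u = true → p u = true)
    {a : Int} (ha : a ∈ l) (hpa : p a = true) (hqa : q a = false) :
    l.countP q < l.countP p := by
  induction l with
  | nil => simp at ha
  | cons x xs ih =>
    rcases List.mem_cons.mp ha with rfl | hmem
    · simp [hpa, hqa]
      have : xs.countP q ≤ xs.countP p := List.countP_mono_left (fun u hu => himp u)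
      omega
    · have := ih hmem
      by_cases hq : q x = true
      · simp [hq, himp x hq]; omega
      · simp [List.countP_cons, hq]
        split <;> omega

-- the walk's accumulator only shifts the result
lemma pv_walk_shift (s : List Int) : ∀ (f : Nat) (c n : Int),
    pvWalk s f c n = n - 1 + pvWalk s f c 1 := by
  intro f
  induction f with
  | zero => intro c n; simp [pvWalk]
  | succ f ih =>
    intro c n
    simp only [pvWalk]
    split
    · split
      · ring
      · rw [ih _ (n + 1), ih _ (1 + 1)]; ring
    · ring

-- the walk is fuel-insensitive past the number of set elements above cur
lemma pv_walk_stable (s : List Int) : ∀ (f g : Nat) (c n : Int),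
    s.countP (fun u => decide (c < u)) < f → s.countP (fun u => decide (c < u)) < g →
    pvWalk s f c n = pvWalk s g c n := by
  intro f
  induction f with
  | zero => intro g c n hf; omega
  | succ f ih =>
    intro g c n hf hg
    cases g with
    | zero => omega
    | succ g =>
      simp only [pvWalk]
      split
      · rename_i hmem
        split
        · rfl
        · rename_i hne
          have hlt : s.countP (fun u => decide (c * c < u)) < s.countP (fun u => decide (c < u)) := by
            refine pv_countP_lt (fun u hu => ?_) hmem ?_ ?_
            · simp at hu ⊢; exact lt_trans (pv_lt_sq hne) hu
            · simp; exact pv_lt_sq hne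
            · simp
          exact ih g (c * c) (n + 1) (by omega) (by omega)
      · rfl

-- enough fuel for every member of the set
lemma pv_mu_lt_len {nums : List Int} {c : Int} (hc : c ∈ PySem.Set.ofList nums) :
    (PySem.Set.ofList nums).countP (fun u => decide (c < u)) < nums.length := by
  have h1 : (PySem.Set.ofList nums).countP (fun u => decide (c < u)) <
      (PySem.Set.ofList nums).countP (fun _ => true) :=
    pv_countP_lt (fun u _ => rfl) hc rfl (by simp)
  have h2 := PySem.Set.length_ofList_le (xs := nums)
  calc _ < (PySem.Set.ofList nums).countP (fun _ => true) := h1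
    _ = (PySem.Set.ofList nums).length := by simp
    _ ≤ nums.length := h2

-- the max fold's value is the initial value or one of the f-images
lemma pv_foldmax_mem (f : Int → Int) : ∀ (xs : List Int) (init : Int),
    xs.foldl (fun m u => max m (f u)) init = init ∨
      ∃ u ∈ xs, xs.foldl (fun m u => max m (f u)) init = f u := by
  intro xs
  induction xs with
  | nil => intro init; simp
  | cons x t ih =>
    intro init
    simp only [List.foldl_cons]
    rcases ih (max init (f x)) with h | ⟨u, hu, h⟩
    · rcases max_choice init (f x) with hm | hm
      · exact Or.inl (by rw [h, hm])
      · exact Or.inr ⟨x, List.mem_cons_self, by rw [h, hm]⟩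
    · exact Or.inr ⟨u, List.mem_cons_of_mem _ hu, h⟩

-- two element-equal lists have the same max fold from 0
lemma pv_foldmax_congr (f : Int → Int) (l₁ l₂ : List Int) (h : ∀ u, u ∈ l₁ ↔ u ∈ l₂) :
    l₁.foldl (fun m u => max m (f u)) 0 = l₂.foldl (fun m u => max m (f u)) 0 := by
  have key : ∀ (a b : List Int), (∀ u, u ∈ a → u ∈ b) →
      a.foldl (fun m u => max m (f u)) 0 ≤ b.foldl (fun m u => max m (f u)) 0 := by
    intro a b hab
    rcases pv_foldmax_mem f a 0 with hm | ⟨u, hu, hm⟩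
    · rw [hm]; exact (PySem.List.le_foldl_max_int b f 0).1
    · rw [hm]; exact (PySem.List.le_foldl_max_int b f 0).2 u (hab u hu)
  exact le_antisymm (key l₁ l₂ fun u => (h u).mp) (key l₂ l₁ fun u => (h u).mpr)

-- A's fold invariant: over a descending list, dp holds exactly the processed
-- values, each mapped to its walk length, and mx is their running maximum.
lemma pv_foldA (nums : List Int) : ∀ (r done : List Int) (dp : PySem.Dict Int Int) (mx : Int),
    (∀ u, u ∈ PySem.Set.ofList nums ↔ (u ∈ done ∨ u ∈ r)) →
    (∀ d ∈ done, ∀ x ∈ r, x ≤ d) →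
    r.Pairwise (fun a b => b ≤ a) →
    (∀ u, dp.get? u = if u ∈ done then some (pvWalk (PySem.Set.ofList nums) nums.length u 1) else none) →
    (∀ u ∈ done, pvWalk (PySem.Set.ofList nums) nums.length u 1 ≤ mx) →
    (r.foldl pvStepA (dp, mx)).2 =
      r.foldl (fun m u => max m (pvWalk (PySem.Set.ofList nums) nums.length u 1)) mx := by
  intro r
  induction r with
  | nil => intro done dp mx _ _ _ _ _; rfl
  | cons num r' ih =>
    intro done dp mx hmem hsort hpw hdp hmx
    by_cases hin : num ∈ done
    · -- duplicate: A skips it, and its walk length is already ≤ mx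
      have hct : dp.contains num = true := by
        rw [PySem.Dict.contains_eq_isSome_get?, hdp num, if_pos hin]; rfl
      have hstep : pvStepA (dp, mx) num = (dp, mx) := by
        simp [pvStepA, hct]
      have hmaxeq : max mx (pvWalk (PySem.Set.ofList nums) nums.length num 1) = mx :=
        max_eq_left (hmx num hin)
      simp only [List.foldl_cons, hstep, hmaxeq]
      exact ih done dp mx
        (fun u => by rw [hmem u]; simp only [List.mem_cons]
                     constructor
                     · rintro (h | rfl | h) <;> [exact Or.inl h; exact Or.inl hin; exact Or.inr h]
                     · rintro (h | h) <;> [exact Or.inl h; exact Or.inr (Or.inr h)])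
        (fun d hd x hx => hsort d hd x (List.mem_cons_of_mem _ hx))
        ((List.pairwise_cons.mp hpw).2)
        hdp hmx
    · -- fresh value: the step stores exactly its walk length
      have hct : dp.contains num = false := by
        rw [PySem.Dict.contains_eq_isSome_get?, hdp num, if_neg hin]; rfl
      have hnumS : num ∈ PySem.Set.ofList nums := (hmem num).mpr (Or.inr List.mem_cons_self)
      have hr'le : ∀ x ∈ r', x ≤ num := (List.pairwise_cons.mp hpw).1
      obtain ⟨L, hL⟩ : ∃ L, nums.length = L + 1 := by
        have : num ∈ nums := (PySem.Set.mem_ofList _ _).mp hnumS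
        cases nums with
        | nil => simp at this
        | cons a t => exact ⟨t.length, rfl⟩
      obtain ⟨dpN, hstep, hget⟩ : ∃ d, pvStepA (dp, mx) num =
          (d, max mx (pvWalk (PySem.Set.ofList nums) nums.length num 1)) ∧
          ∀ u, d.get? u = if u = num then some (pvWalk (PySem.Set.ofList nums) nums.length num 1)
            else dp.get? u := by
        have hsq : num ^ 2 = num * num := by ring
        by_cases hself : num * num = num
        · -- num is 0 or 1: the self-square is counted once
          have hnxtS : num * num ∈ PySem.Set.ofList nums := by rw [hself]; exact hnumS
          have hW : pvWalk (PySem.Set.ofList nums) nums.length num 1 = 2 := by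
            rw [hL]
            simp only [pvWalk]
            rw [if_pos hnxtS, if_pos hself]
            norm_num
          refine ⟨(dp.insert num 1).insert num (1 + 1), ?_, ?_⟩
          · simp only [pvStepA, hct, Bool.false_eq_true, if_false, hsq, hself,
              PySem.Dict.contains_insert_self, if_true, PySem.Dict.getD_insert_self, hW]
            norm_num
          · intro u
            by_cases hu : u = num
            · subst hu; simp [PySem.Dict.get?_insert_self, hW]
            · simp [PySem.Dict.get?_insert_of_ne _ _ hu, hu]
        · have hgt : num < num * num := pv_lt_sq hself
          have hc1 : (dp.insert num 1).contains (num * num) = dp.contains (num * num) := by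
            rw [PySem.Dict.contains_insert]
            have : (num * num == num) = false := by simp [hself]
            simp [this]
          by_cases hS2 : num * num ∈ PySem.Set.ofList nums
          · -- the square is present: it was processed earlier (it is larger)
            have hdone2 : num * num ∈ done := by
              rcases (hmem _).mp hS2 with h | h
              · exact h
              · rcases List.mem_cons.mp h with h' | h'
                · exact absurd h' hself
                · exact absurd (hr'le _ h') (not_le.mpr hgt)
            have hc2 : dp.contains (num * num) = true := by
              rw [PySem.Dict.contains_eq_isSome_get?, hdp _, if_pos hdone2]; rfl
            have hWsq : dp.getD (num * num) 0 =
                pvWalk (PySem.Set.ofList nums) nums.length (num * num) 1 := by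
              rw [PySem.Dict.getD_eq_get?_getD, hdp _, if_pos hdone2]; rfl
            have hmu1 : (PySem.Set.ofList nums).countP (fun u => decide (num * num < u)) <
                (PySem.Set.ofList nums).countP (fun u => decide (num < u)) := by
              refine pv_countP_lt (fun u hu => ?_) hS2 ?_ ?_
              · simp at hu ⊢; exact lt_trans hgt hu
              · simp; exact hgt
              · simp
            have hmu2 := pv_mu_lt_len hnumS
            have hW : pvWalk (PySem.Set.ofList nums) nums.length num 1 =
                1 + pvWalk (PySem.Set.ofList nums) nums.length (num * num) 1 := by
              conv_lhs => rw [hL]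
              simp only [pvWalk]
              rw [if_pos hS2, if_neg hself, pv_walk_shift _ L (num * num) (1 + 1),
                pv_walk_stable (PySem.Set.ofList nums) L nums.length (num * num) 1
                  (by omega) (pv_mu_lt_len hS2)]
              ring
            refine ⟨(dp.insert num 1).insert num
              (1 + pvWalk (PySem.Set.ofList nums) nums.length (num * num) 1), ?_, ?_⟩
            · simp [pvStepA, hct, hsq, hc1, hc2, PySem.Dict.getD_insert, hself, hWsq, hW]
            · intro u
              by_cases hu : u = num
              · subst hu; simp [PySem.Dict.get?_insert_self, hW]
              · simp [PySem.Dict.get?_insert_of_ne _ _ hu, hu]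
          · -- the square is absent: chain length 1
            have hc2 : dp.contains (num * num) = false := by
              rw [PySem.Dict.contains_eq_isSome_get?, hdp _]
              have : num * num ∉ done := fun h => hS2 ((hmem _).mpr (Or.inl h))
              rw [if_neg this]; rfl
            have hW : pvWalk (PySem.Set.ofList nums) nums.length num 1 = 1 := by
              rw [hL]; simp [pvWalk, hS2]
            refine ⟨dp.insert num 1, ?_, ?_⟩
            · simp only [pvStepA, hct, Bool.false_eq_true, if_false, hsq, hc1, hc2,
                PySem.Dict.getD_insert_self, hW]
            · intro u
              by_cases hu : u = num
              · subst hu; simp [PySem.Dict.get?_insert_self, hW]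
              · simp [PySem.Dict.get?_insert_of_ne _ _ hu, hu]
      simp only [List.foldl_cons, hstep]
      exact ih (done ++ [num]) dpN (max mx (pvWalk (PySem.Set.ofList nums) nums.length num 1))
        (fun u => by rw [hmem u]; simp [List.mem_append, List.mem_cons]; tauto)
        (fun d hd x hx => by
          rcases List.mem_append.mp hd with h | h
          · exact hsort d h x (List.mem_cons_of_mem _ hx)
          · rw [List.mem_singleton.mp h]; exact hr'le x hx)
        ((List.pairwise_cons.mp hpw).2)
        (fun u => by
          rw [hget u]
          by_cases hu : u = num
          · subst hu; simp
          · rw [hdp u]; simp [hu])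
        (fun u hu => by
          rcases List.mem_append.mp hu with h | h
          · exact le_trans (hmx u h) (le_max_left _ _)
          · rw [List.mem_singleton.mp h]; exact le_max_right _ _)

-- ===== VERDICT (by name: the statement is the Claim_ definition above) =====
theorem longestSquareStreak_spec : Claim_equal_longestSquareStreak := by
  intro nums _
  unfold Spec_longestSquareStreak longestSquareStreak longestSquareStreak_alt
  have hA := pv_foldA nums (PySem.List.sorted nums (fun x => x) true) [] PySem.Dict.empty 0
    (fun u => by simp [PySem.Set.mem_ofList, PySem.List.mem_sorted])
    (by simp)
    (by simpa using PySem.List.sorted_pairwise_rev (xs := nums) (key := fun x => x))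
    (fun u => by simp [PySem.Dict.get?_empty])
    (by simp)
  simp only []
  rw [hA, pv_foldmax_congr _ _ (PySem.Set.ofList nums)
    (fun u => by simp [PySem.List.mem_sorted, PySem.Set.mem_ofList])]
  split_ifs <;> omega
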